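-- pv_equiv track=rewrite | github.com/drquandary/mcp-academic-editor | src/plan.py | _needs_citation
-- ===== SOURCE A (Python) =====
-- def _needs_citation(sentence: str) -> bool:
--     """Check if sentence makes claims that need citations."""
--     claim_indicators = [
--         "research shows", "studies indicate", "evidence suggests",
--         "according to", "findings reveal", "data shows",
--         "scholars argue", "experts believe", "recent work"
--     ]
--     sentence_lower = sentence.lower()
--     return any(indicator in sentence_lower for indicator in claim_indicators)
-- ===== SOURCE B (Python) =====
-- _INDICATORS = (
--     "research shows", "studies indicate", "evidence suggests",
--     "according to", "findings reveal", "data shows",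
--     "scholars argue", "experts believe", "recent work",
-- )
--
-- def _needs_citation(sentence: str) -> bool:
--     # One position-driven scan over the lowered sentence: at each position,
--     # test whether some indicator starts exactly there.
--     s = sentence.lower()
--     i = 0
--     while True:
--         for indicator in _INDICATORS:
--             if s.startswith(indicator, i):
--                 return True
--         if i >= len(s):
--             return False
--         i += 1
-- ===== Notes on version B (the rewrite author's own statement) =====
-- stated objective: alternative
-- what changed: B replaces A's nine whole-sentence substring-membership scans (one per indicator) by a single position-driven scan of the lowered sentence that tests, at each position, whether some indicator starts exactly there.
import Mathlib
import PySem

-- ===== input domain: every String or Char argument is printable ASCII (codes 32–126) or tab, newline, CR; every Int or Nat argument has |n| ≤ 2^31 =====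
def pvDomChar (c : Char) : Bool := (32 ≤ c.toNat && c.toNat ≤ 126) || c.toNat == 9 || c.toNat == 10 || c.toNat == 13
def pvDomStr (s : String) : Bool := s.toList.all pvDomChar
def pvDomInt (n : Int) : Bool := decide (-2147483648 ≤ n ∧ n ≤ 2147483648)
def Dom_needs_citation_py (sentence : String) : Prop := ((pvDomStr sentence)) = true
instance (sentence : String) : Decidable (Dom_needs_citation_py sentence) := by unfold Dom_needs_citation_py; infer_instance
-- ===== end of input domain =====

-- B replaces A's per-indicator whole-sentence 'in' searches by one position-driven
-- scan over the suffixes of the lowered sentence (alternative decomposition, same cost).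


-- ===== PORT A =====
def claimIndicators : List String :=
  ["research shows", "studies indicate", "evidence suggests",
   "according to", "findings reveal", "data shows",
   "scholars argue", "experts believe", "recent work"]

def needs_citation_py (sentence : String) : Bool :=
  let sentence_lower := PySem.Str.lower sentence
  claimIndicators.any (fun indicator => PySem.Str.isIn indicator sentence_lower)

-- ===== PORT B =====
def altIndicators : List String :=
  ["research shows", "studies indicate", "evidence suggests",
   "according to", "findings reveal", "data shows",
   "scholars argue", "experts believe", "recent work"]

-- the while-loop of Source B over the position i, carried as the suffix s.drop i:
-- s.startswith(indicator, i) (0 ≤ i ≤ len(s)) is exactly a prefix test on that suffix,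
-- ported here as PySem.Chars.startswith on the current suffix (exact on this domain)
def altScan : List Char → Bool
  | [] => altIndicators.any (fun indicator => PySem.Chars.startswith [] indicator.toList)
  | c :: t =>
      if altIndicators.any (fun indicator => PySem.Chars.startswith (c :: t) indicator.toList)
      then true else altScan t

def needs_citation_py_alt (sentence : String) : Bool :=
  altScan (PySem.Str.lower sentence).toList

-- ===== PRECONDITION & SPEC =====
def Spec_needs_citation_py (sentence : String) (out : Bool) : Prop := out = needs_citation_py_alt sentence
instance (sentence : String) (out : Bool) : Decidable (Spec_needs_citation_py sentence out) := by unfold Spec_needs_citation_py; infer_instance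

-- ===== CLAIM (what is proved, stated in full; the proofs are below) =====
def Claim_equal_needs_citation_py : Prop := ∀ (sentence : String), Dom_needs_citation_py sentence → Spec_needs_citation_py sentence (needs_citation_py sentence)

-- ===== LEMMAS AND PROOFS =====

theorem isIn_cons (sub : List Char) (c : Char) (t : List Char) :
    PySem.Chars.isIn sub (c :: t) =
      (PySem.Chars.startswith (c :: t) sub || PySem.Chars.isIn sub t) := by
  rw [Bool.eq_iff_iff]
  simp only [Bool.or_eq_true, PySem.Chars.isIn_iff_infix, PySem.Chars.startswith_iff]
  exact List.infix_cons_iff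

theorem any_isIn_nil (L : List String) :
    L.any (fun i => PySem.Chars.startswith [] i.toList) =
      L.any (fun i => PySem.Chars.isIn i.toList []) := by
  rw [Bool.eq_iff_iff]
  simp only [List.any_eq_true, PySem.Chars.startswith_iff, PySem.Chars.isIn_iff_infix,
    List.prefix_nil, List.infix_nil]

theorem any_isIn_cons (L : List String) (c : Char) (t : List Char) :
    L.any (fun i => PySem.Chars.isIn i.toList (c :: t)) =
      (L.any (fun i => PySem.Chars.startswith (c :: t) i.toList) ||
        L.any (fun i => PySem.Chars.isIn i.toList t)) := by
  rw [Bool.eq_iff_iff]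
  simp only [Bool.or_eq_true, List.any_eq_true, isIn_cons]
  constructor
  · rintro ⟨i, hi, h | h⟩
    · exact Or.inl ⟨i, hi, h⟩
    · exact Or.inr ⟨i, hi, h⟩
  · rintro (⟨i, hi, h⟩ | ⟨i, hi, h⟩)
    · exact ⟨i, hi, Or.inl h⟩
    · exact ⟨i, hi, Or.inr h⟩

theorem altScan_eq (s : List Char) :
    altScan s = altIndicators.any (fun indicator => PySem.Chars.isIn indicator.toList s) := by
  induction s with
  | nil =>
      simp only [altScan]
      exact any_isIn_nil altIndicators
  | cons c t ih =>
      rw [any_isIn_cons, ← ih]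
      simp only [altScan]
      cases h : altIndicators.any (fun i => PySem.Chars.startswith (c :: t) i.toList) <;>
        simp

-- ===== VERDICT (by name: the statement is the Claim_ definition above) =====
theorem needs_citation_py_spec : Claim_equal_needs_citation_py := by
  intro sentence _
  unfold Spec_needs_citation_py needs_citation_py needs_citation_py_alt
  rw [altScan_eq]
  simp only [claimIndicators, altIndicators, PySem.Str.isIn_eq]
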